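-- pv_equiv track=rewrite | github.com/raphael-group/dialect | analysis/generate_top_ranked_interactions_tex_tables.py | _build_subtable_latex_
-- ===== SOURCE A (Python) =====
-- def _build_subtable_latex_(
--     methods_list: list,
--     top_pairs_by_method: dict,
--     metric_labels: dict,
--     ixn_type: str,
-- ) -> str:
--     """TODO: Add docstring."""
--     num_methods = len(methods_list)
--     col_spec = "||".join(["cc"] * num_methods)
--
--     lines = []
--     lines.append(r"\renewcommand{\arraystretch}{1}")
--     lines.append(r"\begin{tabular}{" + col_spec + r"}")
--     lines.append(r"\hline")
--
--     header_parts = [r"\multicolumn{2}{c}{" + method + "}" for method in methods_list]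
--     lines.append(" & ".join(header_parts) + r" \\ \hline")
--
--     subheader_parts = []
--     for method in methods_list:
--         col_name = f"{ixn_type} Gene Pair"
--         subheader_parts.append(col_name)
--         subheader_parts.append(metric_labels[method])
--     lines.append(" & ".join(subheader_parts) + r" \\ \hline")
--
--     max_rows = max(len(top_pairs_by_method[m]) for m in methods_list)
--     for i in range(max_rows):
--         row_entries = []
--         for method in methods_list:
--             pairs_list = top_pairs_by_method[method]
--             if i < len(pairs_list):
--                 pair_str, val_str = pairs_list[i]
--                 row_entries.append(pair_str)
--                 row_entries.append(val_str)
--             else: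
--                 row_entries.append("")
--                 row_entries.append("")
--         lines.append(" & ".join(row_entries) + r" \\")
--
--     lines.append(r"\hline")
--     lines.append(r"\end{tabular}")
--     return "\n".join(lines)
-- ===== SOURCE B (Python) =====
-- def _build_subtable_latex_(
--     methods_list: list,
--     top_pairs_by_method: dict,
--     metric_labels: dict,
--     ixn_type: str,
-- ) -> str:
--     max_rows = max(len(top_pairs_by_method[m]) for m in methods_list)
--     header = ""
--     subheader = ""
--     rows = [""] * max_rows
--     sep = ""
--     for m in methods_list:
--         header += sep + r"\multicolumn{2}{c}{" + m + "}"
--         subheader += sep + ixn_type + " Gene Pair & " + metric_labels[m]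
--         col = top_pairs_by_method[m]
--         rows = [
--             r + sep + (col[i][0] + " & " + col[i][1] if i < len(col) else " & ")
--             for i, r in enumerate(rows)
--         ]
--         sep = " & "
--     parts = [
--         r"\renewcommand{\arraystretch}{1}",
--         r"\begin{tabular}{" + "||".join(["cc"] * len(methods_list)) + "}",
--         r"\hline",
--         header + r" \\ \hline",
--         subheader + r" \\ \hline",
--     ]
--     parts += [r + r" \\" for r in rows]
--     parts += [r"\hline", r"\end{tabular}"]
--     return "\n".join(parts)
-- ===== Notes on version B (the rewrite author's own statement) =====
-- stated objective: alternative
-- what changed: A builds the body row-major (outer loop over row indices, inner loop probing every method's list and joining per-row entry lists); B builds column-major with a single fused pass over methods that accumulates the header string, the subheader string and every padded row string simultaneously by appending each method's cell text to the growing row strings, so the per-row join and the separate subheader loop disappear.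
import Mathlib
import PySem

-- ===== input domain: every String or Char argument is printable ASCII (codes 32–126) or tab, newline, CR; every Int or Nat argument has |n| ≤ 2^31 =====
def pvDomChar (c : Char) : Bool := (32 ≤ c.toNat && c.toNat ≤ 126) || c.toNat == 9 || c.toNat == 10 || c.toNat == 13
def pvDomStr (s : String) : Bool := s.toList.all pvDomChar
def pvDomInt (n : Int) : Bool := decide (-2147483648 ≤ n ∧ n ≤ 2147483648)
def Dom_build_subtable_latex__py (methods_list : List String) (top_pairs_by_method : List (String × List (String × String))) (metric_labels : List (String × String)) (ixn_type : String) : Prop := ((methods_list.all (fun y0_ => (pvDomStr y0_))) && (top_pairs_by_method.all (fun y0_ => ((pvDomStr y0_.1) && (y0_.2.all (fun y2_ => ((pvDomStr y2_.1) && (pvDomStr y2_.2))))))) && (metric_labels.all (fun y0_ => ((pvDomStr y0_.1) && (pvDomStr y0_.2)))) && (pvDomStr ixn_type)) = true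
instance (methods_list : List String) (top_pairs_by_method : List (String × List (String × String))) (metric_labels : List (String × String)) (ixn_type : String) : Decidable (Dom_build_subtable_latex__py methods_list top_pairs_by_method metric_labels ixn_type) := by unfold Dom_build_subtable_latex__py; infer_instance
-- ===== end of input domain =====

-- B replaces A's row-major body loop (outer loop over row indices, per-row join of entry lists) by a single
-- column-major pass over methods that accumulates header, subheader and every padded row string at once.
-- Both programs only READ their arguments; on empty methods_list and on missing dict keys both Pythons raise.

-- ===== PORT A =====
-- Python's `max(...)` raises on an empty generator: `.getD 0` is reached only outside Pre_;
-- `Dict.getD … ""` / `Dict.getD … []` stand for the raising `metric_labels[method]` /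
-- `top_pairs_by_method[method]`, exact under Pre_ (keys present).
def build_subtable_latex__py (methods_list : List String) (top_pairs_by_method : List (String × List (String × String))) (metric_labels : List (String × String)) (ixn_type : String) : String :=
  let num_methods := methods_list.length
  let col_spec := PySem.Str.join "||" (List.replicate num_methods "cc")
  let lines : List String :=
    ["\\renewcommand{\\arraystretch}{1}",
     "\\begin{tabular}{" ++ col_spec ++ "}",
     "\\hline"]
  let header_parts := methods_list.map (fun method => "\\multicolumn{2}{c}{" ++ method ++ "}")
  let lines := lines ++ [PySem.Str.join " & " header_parts ++ " \\\\ \\hline"]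
  let subheader_parts := methods_list.foldl (fun acc method =>
      acc ++ [ixn_type ++ " Gene Pair", PySem.Dict.getD (PySem.Dict.mk metric_labels) method ""]) []
  let lines := lines ++ [PySem.Str.join " & " subheader_parts ++ " \\\\ \\hline"]
  let max_rows := (PySem.List.max? (methods_list.map (fun m => (PySem.Dict.getD (PySem.Dict.mk top_pairs_by_method) m []).length)) (fun x => x)).getD 0
  let lines := (List.range max_rows).foldl (fun ls i =>
      let row_entries := methods_list.foldl (fun acc method =>
          let pairs_list := PySem.Dict.getD (PySem.Dict.mk top_pairs_by_method) method []
          if i < pairs_list.length then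
            acc ++ [(pairs_list.getD i ("", "")).1, (pairs_list.getD i ("", "")).2]
          else
            acc ++ ["", ""]) []
      ls ++ [PySem.Str.join " & " row_entries ++ " \\\\"]) lines
  let lines := lines ++ ["\\hline", "\\end{tabular}"]
  PySem.Str.join "\n" lines

-- ===== PORT B =====
-- one step of Source B's fused loop over methods; the state is (header, subheader, rows, sep);
-- `[r + sep + … for i, r in enumerate(rows)]` is rendered as rows.mapIdx (index i is a Nat ≥ 0,
-- and `col[i]` is only read under `i < len(col)`, so getD is exact).
def pvBStep (top_pairs_by_method : List (String × List (String × String))) (metric_labels : List (String × String)) (ixn_type : String)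
    (st : String × String × List String × String) (m : String) : String × String × List String × String :=
  let col := PySem.Dict.getD (PySem.Dict.mk top_pairs_by_method) m []
  (st.1 ++ st.2.2.2 ++ "\\multicolumn{2}{c}{" ++ m ++ "}",
   st.2.1 ++ st.2.2.2 ++ ixn_type ++ " Gene Pair & " ++ PySem.Dict.getD (PySem.Dict.mk metric_labels) m "",
   st.2.2.1.mapIdx (fun i r =>
     r ++ st.2.2.2 ++ (if i < col.length then (col.getD i ("", "")).1 ++ " & " ++ (col.getD i ("", "")).2 else " & ")),
   " & ")

def build_subtable_latex__py_alt (methods_list : List String) (top_pairs_by_method : List (String × List (String × String))) (metric_labels : List (String × String)) (ixn_type : String) : String :=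
  let max_rows := (PySem.List.max? (methods_list.map (fun m => (PySem.Dict.getD (PySem.Dict.mk top_pairs_by_method) m []).length)) (fun x => x)).getD 0
  let st := methods_list.foldl (pvBStep top_pairs_by_method metric_labels ixn_type)
      ("", "", List.replicate max_rows "", "")
  PySem.Str.join "\n"
    (["\\renewcommand{\\arraystretch}{1}",
      "\\begin{tabular}{" ++ PySem.Str.join "||" (List.replicate methods_list.length "cc") ++ "}",
      "\\hline",
      st.1 ++ " \\\\ \\hline",
      st.2.1 ++ " \\\\ \\hline"]
     ++ st.2.2.1.map (fun r => r ++ " \\\\")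
     ++ ["\\hline", "\\end{tabular}"])

-- ===== PRECONDITION & SPEC =====
-- Pre_ excludes exactly the inputs where the Python A raises (and B raises identically): empty
-- methods_list (ValueError from max()) and methods missing from metric_labels or top_pairs_by_method (KeyError).
def Pre_build_subtable_latex__py (methods_list : List String) (top_pairs_by_method : List (String × List (String × String))) (metric_labels : List (String × String)) (ixn_type : String) : Prop :=
  methods_list ≠ [] ∧ ∀ m ∈ methods_list, m ∈ metric_labels.map Prod.fst ∧ m ∈ top_pairs_by_method.map Prod.fst
instance (methods_list : List String) (top_pairs_by_method : List (String × List (String × String))) (metric_labels : List (String × String)) (ixn_type : String) : Decidable (Pre_build_subtable_latex__py methods_list top_pairs_by_method metric_labels ixn_type) := by unfold Pre_build_subtable_latex__py; infer_instance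

def pvWitness_build_subtable_latex__py : List String × (List (String × List (String × String))) × (List (String × String)) × String :=
  (["M1", "M2"], [("M1", [("GA:GB", "0.12")]), ("M2", [])], [("M1", "p-value"), ("M2", "LRT")], "ME")

def Spec_build_subtable_latex__py (methods_list : List String) (top_pairs_by_method : List (String × List (String × String))) (metric_labels : List (String × String)) (ixn_type : String) (out : String) : Prop := out = build_subtable_latex__py_alt methods_list top_pairs_by_method metric_labels ixn_type
instance (methods_list : List String) (top_pairs_by_method : List (String × List (String × String))) (metric_labels : List (String × String)) (ixn_type : String) (out : String) : Decidable (Spec_build_subtable_latex__py methods_list top_pairs_by_method metric_labels ixn_type out) := by unfold Spec_build_subtable_latex__py; infer_instance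

-- ===== CLAIM (what is proved, stated in full; the proofs are below) =====
def Claim_equal_build_subtable_latex__py : Prop := ∀ (methods_list : List String) (top_pairs_by_method : List (String × List (String × String))) (metric_labels : List (String × String)) (ixn_type : String), Dom_build_subtable_latex__py methods_list top_pairs_by_method metric_labels ixn_type → Pre_build_subtable_latex__py methods_list top_pairs_by_method metric_labels ixn_type → Spec_build_subtable_latex__py methods_list top_pairs_by_method metric_labels ixn_type (build_subtable_latex__py methods_list top_pairs_by_method metric_labels ixn_type)

-- ===== LEMMAS AND PROOFS =====

-- join lifted to String level
theorem pvSjoin_cons_cons (s x y : String) (t : List String) :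
    PySem.Str.join s (x :: y :: t) = x ++ s ++ PySem.Str.join s (y :: t) := by
  simp [PySem.Str.join, PySem.Chars.join_cons_cons, String.ofList_append, String.append_assoc]

theorem pvSjoin_singleton (s x : String) : PySem.Str.join s [x] = x := by
  simp [PySem.Str.join, PySem.Chars.join_singleton]

theorem pvSjoin_nil (s : String) : PySem.Str.join s [] = "" := by
  simp [PySem.Str.join, PySem.Chars.join_nil]

theorem pvGP (x : String) : (" Gene Pair" : String) ++ (" & " ++ x) = " Gene Pair & " ++ x := by
  rw [← String.append_assoc]
  congr 1

theorem pvGPm (ixn x : String) : ixn ++ " Gene Pair" ++ " & " ++ x = ixn ++ " Gene Pair & " ++ x := by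
  rw [String.append_assoc, String.append_assoc, pvGP, ← String.append_assoc]

-- tail concatenation: what Source B's loop appends for the non-first methods
def pvTail (f : String → String) : List String → String
  | [] => ""
  | m :: t => " & " ++ f m ++ pvTail f t

theorem pvTail_congr (f g : String → String) (t : List String) (h : ∀ m, f m = g m) :
    pvTail f t = pvTail g t := by
  induction t with
  | nil => rfl
  | cons y u ih => simp [pvTail, ih, h y]

theorem pvJoin_eq_tail (f : String → String) (m : String) (t : List String) :
    PySem.Str.join " & " ((m :: t).map f) = f m ++ pvTail f t := by
  induction t generalizing m with
  | nil => simp [pvSjoin_singleton, pvTail]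
  | cons y t ih =>
      simp only [List.map_cons] at ih ⊢
      rw [pvSjoin_cons_cons, ih, pvTail]
      simp [String.append_assoc]

-- collapse the two-entries-per-method flatMap into one string per method
theorem pvJoin_flatMap_pair (a b : String → String) (l : List String) :
    PySem.Str.join " & " (l.flatMap (fun m => [a m, b m]))
      = PySem.Str.join " & " (l.map (fun m => a m ++ " & " ++ b m)) := by
  induction l with
  | nil => simp
  | cons m t ih =>
      cases t with
      | nil => simp [pvSjoin_cons_cons, pvSjoin_singleton]
      | cons y u =>
          simp only [List.flatMap_cons, List.cons_append, List.nil_append, List.map_cons] at ih ⊢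
          rw [pvSjoin_cons_cons, pvSjoin_cons_cons, ih]
          rw [pvSjoin_cons_cons (t := List.map (fun m => a m ++ " & " ++ b m) u)]
          simp [String.append_assoc]

theorem pvFlatMap_single {α : Type} (l : List α) (f : α → String) :
    l.flatMap (fun x => [f x]) = l.map f := by
  induction l with
  | nil => rfl
  | cons x t ih => simp [ih]

theorem pvMapIdx_mapIdx {α β γ : Type} (l : List α) (f : Nat → α → β) (g : Nat → β → γ) :
    (l.mapIdx f).mapIdx g = l.mapIdx (fun i a => g i (f i a)) := by
  induction l generalizing f g with
  | nil => simp
  | cons x t ih => simp [List.mapIdx_cons, ih]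

theorem pvMapIdx_congr {α β : Type} (l : List α) (f g : Nat → α → β) (h : ∀ i a, f i a = g i a) :
    l.mapIdx f = l.mapIdx g := by
  induction l generalizing f g with
  | nil => rfl
  | cons x t ih => simp [List.mapIdx_cons, h, ih (fun i => f (i + 1)) (fun i => g (i + 1)) (fun i a => h (i + 1) a)]

theorem pvMapIdx_replicate {β : Type} (n : Nat) (a : String) (f : Nat → String → β) :
    (List.replicate n a).mapIdx f = (List.range n).map (fun i => f i a) := by
  induction n generalizing f with
  | zero => simp
  | succ n ih =>
      rw [List.replicate_succ, List.range_succ_eq_map, List.mapIdx_cons, ih]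
      simp [List.map_map, Function.comp_def]

-- Source B's per-method cell text for row i
def pvCell (top_pairs_by_method : List (String × List (String × String))) (i : Nat) (m : String) : String :=
  let col := PySem.Dict.getD (PySem.Dict.mk top_pairs_by_method) m []
  if i < col.length then (col.getD i ("", "")).1 ++ " & " ++ (col.getD i ("", "")).2 else " & "

-- the fused fold, characterised in closed form once sep has become " & "
theorem pvFoldB (top : List (String × List (String × String))) (lab : List (String × String)) (ixn : String)
    (l : List String) (h sh : String) (rows : List String) :
    l.foldl (pvBStep top lab ixn) (h, sh, rows, " & ")
      = (h ++ pvTail (fun m => "\\multicolumn{2}{c}{" ++ m ++ "}") l,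
         sh ++ pvTail (fun m => ixn ++ " Gene Pair & " ++ PySem.Dict.getD (PySem.Dict.mk lab) m "") l,
         rows.mapIdx (fun i r => r ++ pvTail (pvCell top i) l),
         " & ") := by
  induction l generalizing h sh rows with
  | nil =>
      simp [pvTail]
      apply List.ext_getElem <;> simp
  | cons m t ih =>
      rw [List.foldl_cons, pvBStep, ih]
      simp only [pvTail, Prod.mk.injEq, pvMapIdx_mapIdx]
      refine ⟨by simp only [String.append_assoc], by simp only [String.append_assoc], ?_, trivial⟩
      apply pvMapIdx_congr
      intro i a
      simp only [pvCell, String.append_assoc]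

theorem pvPortsAgree (methods_list : List String) (top_pairs_by_method : List (String × List (String × String))) (metric_labels : List (String × String)) (ixn_type : String) :
    build_subtable_latex__py methods_list top_pairs_by_method metric_labels ixn_type
      = build_subtable_latex__py_alt methods_list top_pairs_by_method metric_labels ixn_type := by
  unfold build_subtable_latex__py build_subtable_latex__py_alt
  simp only [PySem.List.foldl_append_eq_flatMap, List.nil_append]
  cases methods_list with
  | nil =>
      simp [pvSjoin_nil, List.foldl, PySem.List.max?]
  | cons m0 t =>
      rw [List.foldl_cons, pvBStep, pvFoldB]
      simp only
      apply congrArg (PySem.Str.join "\n")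
      rw [pvFlatMap_single, pvMapIdx_mapIdx, pvMapIdx_replicate, List.map_map]
      set N := (PySem.List.max? ((m0 :: t).map (fun m => (PySem.Dict.getD (PySem.Dict.mk top_pairs_by_method) m []).length)) (fun x => x)).getD 0 with hN
      have hhead : PySem.Str.join " & " ((m0 :: t).map (fun m => "\\multicolumn{2}{c}{" ++ m ++ "}")) ++ " \\\\ \\hline"
          = "" ++ "" ++ "\\multicolumn{2}{c}{" ++ m0 ++ "}" ++ pvTail (fun m => "\\multicolumn{2}{c}{" ++ m ++ "}") t ++ " \\\\ \\hline" := by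
        rw [pvJoin_eq_tail]; simp only [String.append_assoc, String.empty_append]
      have hsub : PySem.Str.join " & " ((m0 :: t).flatMap (fun m => [ixn_type ++ " Gene Pair", PySem.Dict.getD (PySem.Dict.mk metric_labels) m ""])) ++ " \\\\ \\hline"
          = "" ++ "" ++ ixn_type ++ " Gene Pair & " ++ PySem.Dict.getD (PySem.Dict.mk metric_labels) m0 "" ++ pvTail (fun m => ixn_type ++ " Gene Pair & " ++ PySem.Dict.getD (PySem.Dict.mk metric_labels) m "") t ++ " \\\\ \\hline" := by
        rw [pvJoin_flatMap_pair, pvJoin_eq_tail, pvGPm,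
            pvTail_congr _ _ t (fun m => pvGPm ixn_type (PySem.Dict.getD (PySem.Dict.mk metric_labels) m ""))]
        simp only [String.append_assoc, String.empty_append]
      have hrows : ∀ i : Nat, PySem.Str.join " & " ((m0 :: t).foldl (fun acc method =>
            let pairs_list := PySem.Dict.getD (PySem.Dict.mk top_pairs_by_method) method []
            if i < pairs_list.length then
              acc ++ [(pairs_list.getD i ("", "")).1, (pairs_list.getD i ("", "")).2]
            else acc ++ ["", ""]) []) ++ " \\\\"
          = ((fun r => r ++ pvTail (pvCell top_pairs_by_method i) t)
              ("" ++ "" ++ (if i < (PySem.Dict.getD (PySem.Dict.mk top_pairs_by_method) m0 []).length then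
                ((PySem.Dict.getD (PySem.Dict.mk top_pairs_by_method) m0 []).getD i ("", "")).1 ++ " & " ++ ((PySem.Dict.getD (PySem.Dict.mk top_pairs_by_method) m0 []).getD i ("", "")).2 else " & "))) ++ " \\\\" := by
        intro i
        have hstep : ∀ (acc : List String) (m : String),
            (let pairs_list := PySem.Dict.getD (PySem.Dict.mk top_pairs_by_method) m []
             if i < pairs_list.length then
               acc ++ [(pairs_list.getD i ("", "")).1, (pairs_list.getD i ("", "")).2]
             else acc ++ ["", ""])
            = acc ++ (fun m => [(if i < (PySem.Dict.getD (PySem.Dict.mk top_pairs_by_method) m []).length then ((PySem.Dict.getD (PySem.Dict.mk top_pairs_by_method) m []).getD i ("", "")).1 else ""),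
                                (if i < (PySem.Dict.getD (PySem.Dict.mk top_pairs_by_method) m []).length then ((PySem.Dict.getD (PySem.Dict.mk top_pairs_by_method) m []).getD i ("", "")).2 else "")]) m := by
          intro acc m
          by_cases hlt : i < (PySem.Dict.getD (PySem.Dict.mk top_pairs_by_method) m []).length <;> simp [hlt]
        rw [PySem.List.foldl_congr_mem _ _ _ _ (fun acc x _ => hstep acc x),
            PySem.List.foldl_append_eq_flatMap, List.nil_append,
            pvJoin_flatMap_pair, pvJoin_eq_tail]
        have hcell : ∀ m, (if i < (PySem.Dict.getD (PySem.Dict.mk top_pairs_by_method) m []).length then ((PySem.Dict.getD (PySem.Dict.mk top_pairs_by_method) m []).getD i ("", "")).1 else "")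
              ++ " & " ++ (if i < (PySem.Dict.getD (PySem.Dict.mk top_pairs_by_method) m []).length then ((PySem.Dict.getD (PySem.Dict.mk top_pairs_by_method) m []).getD i ("", "")).2 else "")
            = pvCell top_pairs_by_method i m := by
          intro m
          by_cases hlt : i < (PySem.Dict.getD (PySem.Dict.mk top_pairs_by_method) m []).length <;>
            simp [pvCell, hlt]
        rw [hcell m0, pvTail_congr _ _ t hcell]
        simp only [pvCell, String.empty_append, String.append_assoc]
      rw [hhead, hsub]
      congr 1
      congr 1
      exact List.map_congr_left (fun i _ => hrows i)

-- ===== VERDICT (by name: the statement is the Claim_ definition above) =====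
theorem build_subtable_latex__py_spec : Claim_equal_build_subtable_latex__py := by
  intro methods_list top_pairs_by_method metric_labels ixn_type _ _
  exact pvPortsAgree methods_list top_pairs_by_method metric_labels ixn_type
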